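-- pv_equiv track=rewrite | github.com/manwar/perlweeklychallenge-club | challenge-214/sgreen/python/ch-2.py | shrink_list
-- ===== SOURCE A (Python) =====
-- def shrink_list(array):
--     '''Shrink the list if it has consecutive numbers'''
--     new_array = []
--     for i in array:
--         number, count = i
--         if len(new_array) and new_array[-1][0] == number:
--             new_array[-1] = (number, count + new_array[-1][1])
--         else:
--             new_array.append((number, count))
--
--     return new_array
-- ===== SOURCE B (Python) =====
-- def shrink_list(array):
--     '''Shrink the list if it has consecutive numbers'''
--     result = []
--     i = 0
--     n = len(array)
--     while i < n:
--         key, total = array[i]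
--         j = i + 1
--         while j < n and array[j][0] == key:
--             total += array[j][1]
--             j += 1
--         result.append((key, total))
--         i = j
--     return result
-- ===== Notes on version B (the rewrite author's own statement) =====
-- stated objective: alternative
-- what changed: B scans each maximal run of equal keys with an inner pointer and emits one summed pair per run, instead of A's incremental merge into the last element of the output list.
import Mathlib
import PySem

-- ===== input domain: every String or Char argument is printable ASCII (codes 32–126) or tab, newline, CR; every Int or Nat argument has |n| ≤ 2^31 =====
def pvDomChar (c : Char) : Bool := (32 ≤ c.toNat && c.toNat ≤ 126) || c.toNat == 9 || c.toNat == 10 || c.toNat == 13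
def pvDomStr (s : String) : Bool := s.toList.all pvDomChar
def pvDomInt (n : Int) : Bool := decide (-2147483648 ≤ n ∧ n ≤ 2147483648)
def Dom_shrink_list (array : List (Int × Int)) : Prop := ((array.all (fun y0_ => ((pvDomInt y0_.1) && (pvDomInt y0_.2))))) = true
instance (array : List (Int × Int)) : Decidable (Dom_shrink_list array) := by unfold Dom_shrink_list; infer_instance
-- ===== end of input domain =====

-- B replaces A's incremental merge-into-last-output-element by a run-scanning loop
-- (sum each maximal run of equal keys, emit one pair per run); objective: alternative, same cost.

-- ===== PORT A =====
-- one iteration of A's for-loop: merge into new_array[-1] or append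
def shrinkStepA (acc : List (Int × Int)) (p : Int × Int) : List (Int × Int) :=
  match acc.getLast? with
  | some last => if last.1 = p.1 then acc.dropLast ++ [(p.1, p.2 + last.2)] else acc ++ [p]
  | none => acc ++ [p]

def shrink_list (array : List (Int × Int)) : List (Int × Int) :=
  array.foldl shrinkStepA []

-- ===== PORT B =====
-- B's inner while loop: consume the rest of the current run, accumulating `total`
def sumRun (key : Int) (total : Int) : List (Int × Int) → Int × List (Int × Int)
  | [] => (total, [])
  | (n, c) :: rest => if n = key then sumRun key (total + c) rest else (total, (n, c) :: rest)

theorem sumRun_len (key : Int) : ∀ (l : List (Int × Int)) (total : Int),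
    (sumRun key total l).2.length ≤ l.length := by
  intro l
  induction l with
  | nil => intro t; simp [sumRun]
  | cons p rest ih =>
    intro t
    obtain ⟨n, c⟩ := p
    simp only [sumRun]
    split
    · exact le_trans (ih (t + c)) (Nat.le_succ _)
    · simp

-- B's outer while loop: one output pair per maximal run
def shrink_list_alt : List (Int × Int) → List (Int × Int)
  | [] => []
  | (k, c) :: rest =>
    let r := sumRun k c rest
    (k, r.1) :: shrink_list_alt r.2
termination_by l => l.length
decreasing_by
  simpa using Nat.lt_succ_of_le (sumRun_len k rest c)

-- ===== PRECONDITION & SPEC =====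
def Spec_shrink_list (array : List (Int × Int)) (out : List (Int × Int)) : Prop := out = shrink_list_alt array
instance (array : List (Int × Int)) (out : List (Int × Int)) : Decidable (Spec_shrink_list array out) := by unfold Spec_shrink_list; infer_instance

-- ===== CLAIM (what is proved, stated in full; the proofs are below) =====
def Claim_equal_shrink_list : Prop := ∀ (array : List (Int × Int)), Dom_shrink_list array → Spec_shrink_list array (shrink_list array)

-- ===== LEMMAS AND PROOFS =====
-- invariant of A's fold: once the output ends with (k, v), A finishes the run of k
-- exactly as B's sumRun does and then proceeds like B on the remainder
theorem foldA_run : ∀ (l acc : List (Int × Int)) (k v : Int),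
    List.foldl shrinkStepA (acc ++ [(k, v)]) l
      = acc ++ (k, (sumRun k v l).1) :: shrink_list_alt (sumRun k v l).2 := by
  intro l
  induction l with
  | nil => intro acc k v; simp [sumRun, shrink_list_alt]
  | cons p rest ih =>
    intro acc k v
    obtain ⟨n, c⟩ := p
    simp only [List.foldl_cons]
    have hstep : shrinkStepA (acc ++ [(k, v)]) (n, c)
        = if k = n then acc ++ [(n, c + v)] else (acc ++ [(k, v)]) ++ [(n, c)] := by
      simp [shrinkStepA]
    by_cases h : n = k
    · subst h
      rw [hstep, if_pos rfl, ih acc n (c + v)]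
      have : sumRun n v ((n, c) :: rest) = sumRun n (v + c) rest := by
        simp [sumRun]
      rw [this, Int.add_comm c v]
    · rw [hstep, if_neg (fun hk => h hk.symm), ih (acc ++ [(k, v)]) n c]
      have : sumRun k v ((n, c) :: rest) = (v, (n, c) :: rest) := by
        simp [sumRun, h]
      rw [this]
      simp [shrink_list_alt]

-- ===== VERDICT (by name: the statement is the Claim_ definition above) =====
theorem shrink_list_spec : Claim_equal_shrink_list := by
  intro array _
  unfold Spec_shrink_list shrink_list
  cases array with
  | nil => simp [shrink_list_alt]
  | cons p rest =>
    obtain ⟨k, c⟩ := p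
    have h0 : shrinkStepA [] (k, c) = [] ++ [(k, c)] := by simp [shrinkStepA]
    simp only [List.foldl_cons, h0, foldA_run rest [] k c]
    simp [shrink_list_alt]
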